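-- pv_equiv track=rewrite | github.com/my-best-day/wiki.rag | src/gen/new_segment_builder.py | get_segment_records
-- ===== SOURCE A (Python) =====
-- def get_segment_records(plot_segment_list_list):
--     # create a dataframe with columns:
--     # segment index, plot index, segment offset, segment length
--     offset = 0
--     segment_records = []
--     segment_index = 0
--     for plot_index, plot_segment_list in enumerate(plot_segment_list_list):
--         for rel_index, segment_bytes in enumerate(plot_segment_list):
--             segment_length = len(segment_bytes)
--             segment_data = (segment_index, plot_index, rel_index, offset, segment_length)
--             segment_records.append(segment_data)
--             offset += segment_length
--             segment_index += 1
--         offset += 6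
--     return segment_records
-- ===== SOURCE B (Python) =====
-- def get_segment_records(plot_segment_list_list):
--     # Two-pass: precompute per-plot base offsets and starting segment indices
--     # (prefix sums), then assemble records per plot with a local running offset.
--     lens = [[len(s) for s in plot] for plot in plot_segment_list_list]
--     bases = []
--     starts = []
--     base = 0
--     start = 0
--     for plot_lens in lens:
--         bases.append(base)
--         starts.append(start)
--         base += sum(plot_lens) + 6
--         start += len(plot_lens)
--     records = []
--     for p, (plot_lens, b0, s0) in enumerate(zip(lens, bases, starts)):
--         off = b0
--         for r, ln in enumerate(plot_lens):
--             records.append((s0 + r, p, r, off, ln))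
--             off += ln
--     return records
-- ===== Notes on version B (the rewrite author's own statement) =====
-- stated objective: alternative
-- what changed: Instead of threading one global running offset and segment counter through nested loops, B first precomputes per-plot base offsets and starting segment indices as prefix-sum tables over a length matrix, then assembles each plot's records independently from its table entries with a local offset.
import Mathlib
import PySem

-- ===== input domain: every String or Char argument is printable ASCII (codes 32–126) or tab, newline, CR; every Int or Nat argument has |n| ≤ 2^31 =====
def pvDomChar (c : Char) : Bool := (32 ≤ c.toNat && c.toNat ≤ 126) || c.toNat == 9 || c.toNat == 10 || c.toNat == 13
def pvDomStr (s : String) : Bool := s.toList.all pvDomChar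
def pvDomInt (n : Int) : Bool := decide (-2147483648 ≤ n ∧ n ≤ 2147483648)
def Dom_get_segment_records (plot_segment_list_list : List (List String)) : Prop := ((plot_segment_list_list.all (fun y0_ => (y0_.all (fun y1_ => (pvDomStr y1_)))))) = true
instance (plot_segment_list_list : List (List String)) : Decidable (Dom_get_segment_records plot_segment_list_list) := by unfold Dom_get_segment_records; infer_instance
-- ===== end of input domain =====

-- B restructures A: prefix-sum tables of per-plot base offsets / start indices, then per-plot record assembly (alternative decomposition, same cost).

-- ===== PORT A =====
-- single pass, nested loops threading (offset, records, segment_index)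
def get_segment_records (plot_segment_list_list : List (List String)) : List (Int × Int × Int × Int × Int) :=
  (((PySem.List.enumerate plot_segment_list_list 0).foldl
    (fun (st : Int × List (Int × Int × Int × Int × Int) × Int) pp =>
      let plot_index := pp.1
      let plot_segment_list := pp.2
      let st2 := (PySem.List.enumerate plot_segment_list 0).foldl
        (fun (st : Int × List (Int × Int × Int × Int × Int) × Int) re =>
          let rel_index := re.1
          let segment_bytes := re.2
          let segment_length := PySem.Str.len segment_bytes
          let segment_data := (st.2.2, plot_index, rel_index, st.1, segment_length)
          (st.1 + segment_length, st.2.1 ++ [segment_data], st.2.2 + 1)) st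
      (st2.1 + 6, st2.2)) (0, [], 0)) : Int × List (Int × Int × Int × Int × Int) × Int).2.1

-- ===== PORT B =====
-- first pass: prefix-sum tables (bases, starts) over the length matrix
def pvTables (lens : List (List Int)) : List Int × List Int :=
  let fin := lens.foldl
    (fun (st : List Int × List Int × Int × Int) plot_lens =>
      (st.1 ++ [st.2.2.1], st.2.1 ++ [st.2.2.2],
       st.2.2.1 + plot_lens.sum + 6, st.2.2.2 + (plot_lens.length : Int)))
    ([], [], 0, 0)
  (fin.1, fin.2.1)

def get_segment_records_alt (plot_segment_list_list : List (List String)) : List (Int × Int × Int × Int × Int) :=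
  let lens := plot_segment_list_list.map (fun plot => plot.map PySem.Str.len)
  let tabs := pvTables lens
  (PySem.List.enumerate ((lens.zip tabs.1).zip tabs.2) 0).foldl
    (fun (records : List (Int × Int × Int × Int × Int)) pt =>
      let p := pt.1
      let plot_lens := pt.2.1.1
      let b0 := pt.2.1.2
      let s0 := pt.2.2
      ((PySem.List.enumerate plot_lens 0).foldl
        (fun (st : Int × List (Int × Int × Int × Int × Int)) rl =>
          (st.1 + rl.2, st.2 ++ [(s0 + rl.1, p, rl.1, st.1, rl.2)])) (b0, records)).2) []

-- ===== PRECONDITION & SPEC =====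
def Spec_get_segment_records (plot_segment_list_list : List (List String)) (out : List (Int × Int × Int × Int × Int)) : Prop := out = get_segment_records_alt plot_segment_list_list
instance (plot_segment_list_list : List (List String)) (out : List (Int × Int × Int × Int × Int)) : Decidable (Spec_get_segment_records plot_segment_list_list out) := by unfold Spec_get_segment_records; infer_instance

-- ===== CLAIM (what is proved, stated in full; the proofs are below) =====
def Claim_equal_get_segment_records : Prop := ∀ (plot_segment_list_list : List (List String)), Dom_get_segment_records plot_segment_list_list → Spec_get_segment_records plot_segment_list_list (get_segment_records plot_segment_list_list)

-- ===== LEMMAS AND PROOFS =====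

-- the records of one plot p, starting at segment index si, offset off, rel index r
def recsOf (p si off r : Int) : List Int → List (Int × Int × Int × Int × Int)
  | [] => []
  | ln :: rest => (si, p, r, off, ln) :: recsOf p (si + 1) (off + ln) (r + 1) rest

-- all records of a list of plot-length lists
def specOuter (pi off si : Int) : List (List Int) → List (Int × Int × Int × Int × Int)
  | [] => []
  | pl :: rest => recsOf pi si off 0 pl ++ specOuter (pi + 1) (off + pl.sum + 6) (si + pl.length) rest

def basesFrom (base : Int) : List (List Int) → List Int
  | [] => []
  | pl :: rest => base :: basesFrom (base + pl.sum + 6) rest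

def startsFrom (start : Int) : List (List Int) → List Int
  | [] => []
  | pl :: rest => start :: startsFrom (start + pl.length) rest

lemma a_inner (segs : List String) (p r off si : Int) (acc : List (Int × Int × Int × Int × Int)) :
    (PySem.List.enumerate segs r).foldl
      (fun (st : Int × List (Int × Int × Int × Int × Int) × Int) re =>
        let rel_index := re.1
        let segment_bytes := re.2
        let segment_length := PySem.Str.len segment_bytes
        let segment_data := (st.2.2, p, rel_index, st.1, segment_length)
        (st.1 + segment_length, st.2.1 ++ [segment_data], st.2.2 + 1)) (off, acc, si)
    = (off + (segs.map PySem.Str.len).sum, acc ++ recsOf p si off r (segs.map PySem.Str.len),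
       si + segs.length) := by
  induction segs generalizing r off si acc with
  | nil => simp [PySem.List.enumerate_nil, recsOf]
  | cons s rest ih =>
    rw [PySem.List.enumerate_cons]
    simp only [List.foldl_cons]
    rw [ih]
    simp [recsOf, List.append_assoc]
    constructor
    · ring
    · ring

lemma a_outer (plots : List (List String)) (pi off si : Int) (acc : List (Int × Int × Int × Int × Int)) :
    ((PySem.List.enumerate plots pi).foldl
      (fun (st : Int × List (Int × Int × Int × Int × Int) × Int) pp =>
        let plot_index := pp.1
        let plot_segment_list := pp.2
        let st2 := (PySem.List.enumerate plot_segment_list 0).foldl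
          (fun (st : Int × List (Int × Int × Int × Int × Int) × Int) re =>
            let rel_index := re.1
            let segment_bytes := re.2
            let segment_length := PySem.Str.len segment_bytes
            let segment_data := (st.2.2, plot_index, rel_index, st.1, segment_length)
            (st.1 + segment_length, st.2.1 ++ [segment_data], st.2.2 + 1)) st
        (st2.1 + 6, st2.2)) (off, acc, si)).2.1
    = acc ++ specOuter pi off si (plots.map (fun pl => pl.map PySem.Str.len)) := by
  induction plots generalizing pi off si acc with
  | nil => simp [PySem.List.enumerate_nil, specOuter]
  | cons pl rest ih =>
    rw [PySem.List.enumerate_cons]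
    simp only [List.foldl_cons, a_inner]
    rw [ih]
    simp [specOuter, List.append_assoc]

lemma b_inner (pl : List Int) (p r off s0 : Int) (acc : List (Int × Int × Int × Int × Int)) :
    ((PySem.List.enumerate pl r).foldl
      (fun (st : Int × List (Int × Int × Int × Int × Int)) rl =>
        (st.1 + rl.2, st.2 ++ [(s0 + rl.1, p, rl.1, st.1, rl.2)])) (off, acc)).2
    = acc ++ recsOf p (s0 + r) off r pl := by
  induction pl generalizing r off acc with
  | nil => simp [PySem.List.enumerate_nil, recsOf]
  | cons ln rest ih =>
    rw [PySem.List.enumerate_cons]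
    simp only [List.foldl_cons]
    rw [ih]
    have : s0 + r + 1 = s0 + (r + 1) := by ring
    simp [recsOf, this, List.append_assoc]

lemma b_outer (lens : List (List Int)) (pi off si : Int) (acc : List (Int × Int × Int × Int × Int)) :
    (PySem.List.enumerate ((lens.zip (basesFrom off lens)).zip (startsFrom si lens)) pi).foldl
      (fun (records : List (Int × Int × Int × Int × Int)) pt =>
        let p := pt.1
        let plot_lens := pt.2.1.1
        let b0 := pt.2.1.2
        let s0 := pt.2.2
        ((PySem.List.enumerate plot_lens 0).foldl
          (fun (st : Int × List (Int × Int × Int × Int × Int)) rl =>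
            (st.1 + rl.2, st.2 ++ [(s0 + rl.1, p, rl.1, st.1, rl.2)])) (b0, records)).2) acc
    = acc ++ specOuter pi off si lens := by
  induction lens generalizing pi off si acc with
  | nil => simp [PySem.List.enumerate_nil, basesFrom, startsFrom, specOuter]
  | cons pl rest ih =>
    simp only [basesFrom, startsFrom, List.zip_cons_cons]
    rw [PySem.List.enumerate_cons]
    simp only [List.foldl_cons]
    rw [b_inner]
    rw [ih]
    simp [specOuter, List.append_assoc]

lemma tables_eq (lens : List (List Int)) (bs ss : List Int) (base start : Int) :
    lens.foldl
      (fun (st : List Int × List Int × Int × Int) plot_lens =>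
        (st.1 ++ [st.2.2.1], st.2.1 ++ [st.2.2.2],
         st.2.2.1 + plot_lens.sum + 6, st.2.2.2 + (plot_lens.length : Int)))
      (bs, ss, base, start)
    = (bs ++ basesFrom base lens, ss ++ startsFrom start lens,
       base + (lens.map (fun pl => pl.sum + 6)).sum,
       start + ((lens.map (fun pl => (pl.length : Int))).sum)) := by
  induction lens generalizing bs ss base start with
  | nil => simp [basesFrom, startsFrom]
  | cons pl rest ih =>
    simp only [List.foldl_cons]
    rw [ih]
    simp [basesFrom, startsFrom, List.append_assoc]
    constructor
    · ring
    · ring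

-- ===== VERDICT (by name: the statement is the Claim_ definition above) =====
theorem get_segment_records_spec : Claim_equal_get_segment_records := by
  intro lss _
  unfold Spec_get_segment_records get_segment_records get_segment_records_alt pvTables
  simp only [a_outer, tables_eq, List.nil_append, b_outer]
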